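-- pv_equiv track=rewrite | github.com/krastranseu-lang/kras-trans-site | tools/build.py | csv_map
-- ===== SOURCE A (Python) =====
-- from typing import Dict, Any, List, Tuple, Iterable, Optional, Set
--
-- def csv_map(rows:List[Dict[str,str]], mapping:Dict[str,List[str]])->List[Dict[str,str]]:
--     out=[]
--     alias_flat=set()
--     for aliases in mapping.values(): alias_flat.update(aliases)
--     for r in rows:
--         o={}
--         for canonical_name, aliases in mapping.items():
--             v=""
--             for a in aliases:
--                 if a in r and r[a]:
--                     v=r[a]; break
--             o[canonical_name]=v
--         for k,v in r.items():
--             if k not in alias_flat: o[k]=v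
--         out.append(o)
--     return out
-- ===== SOURCE B (Python) =====
-- from typing import Dict, List
--
-- def csv_map(rows:List[Dict[str,str]], mapping:Dict[str,List[str]])->List[Dict[str,str]]:
--     # inverted index: alias -> [(canonical_name, priority)] (priority = position in the alias list)
--     pairs = [(a, (cn, i)) for cn, aliases in mapping.items() for i, a in enumerate(aliases)]
--     index = {}
--     for a, entry in pairs:
--         index.setdefault(a, []).append(entry)
--     out = []
--     for r in rows:
--         cand = {}  # canonical_name -> (best priority seen, its value)
--         for k, v in r.items():
--             if v and k in index:
--                 for cn, pos in index[k]:
--                     if cn not in cand or pos < cand[cn][0]: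
--                         cand[cn] = (pos, v)
--         o = {cn: (cand[cn][1] if cn in cand else "") for cn in mapping}
--         for k, v in r.items():
--             if k not in index:
--                 o[k] = v
--         out.append(o)
--     return out
-- ===== Notes on version B (the rewrite author's own statement) =====
-- stated objective: faster
-- what changed: Replaces A's per-row scan over every canonical name and its whole alias list (one dict lookup per alias per row) with an inverted alias->[(canonical,priority)] index built once, plus a single pass over each row's items that keeps the lowest-priority truthy hit per canonical.
import Mathlib
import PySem

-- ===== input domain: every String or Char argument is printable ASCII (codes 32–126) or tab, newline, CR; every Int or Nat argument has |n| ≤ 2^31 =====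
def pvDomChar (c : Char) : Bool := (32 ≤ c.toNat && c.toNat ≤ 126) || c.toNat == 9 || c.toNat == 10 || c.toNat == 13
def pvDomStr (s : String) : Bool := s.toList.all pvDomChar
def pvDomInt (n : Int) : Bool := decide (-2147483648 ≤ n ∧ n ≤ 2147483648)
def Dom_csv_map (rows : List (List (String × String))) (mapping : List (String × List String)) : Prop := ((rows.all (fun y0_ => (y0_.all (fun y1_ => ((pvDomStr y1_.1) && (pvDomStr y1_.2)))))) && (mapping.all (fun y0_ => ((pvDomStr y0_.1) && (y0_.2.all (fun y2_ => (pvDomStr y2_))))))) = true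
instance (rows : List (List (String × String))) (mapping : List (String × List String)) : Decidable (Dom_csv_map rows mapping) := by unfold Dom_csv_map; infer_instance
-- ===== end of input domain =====

-- B replaces A's per-row scan over every canonical name and every alias (with a dict lookup each)
-- by an inverted index alias -> [(canonical, priority)] built once, and a single pass over each
-- row's items that keeps the best (lowest-priority) hit per canonical; objective: faster.

-- ===== PORT A =====
-- inner loop 'for a in aliases: if a in r and r[a]: v=r[a]; break'
def csvFirstAlias (r : PySem.Dict String String) : List String → String
  | [] => ""
  | a :: rest =>
    match r.get? a with
    | some w => if w ≠ "" then w else csvFirstAlias r rest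
    | none => csvFirstAlias r rest

def csv_map (rows : List (List (String × String))) (mapping : List (String × List String)) : List (List (String × String)) :=
  let alias_flat : PySem.Set String :=
    mapping.foldl (fun s p => PySem.Set.update s p.2) PySem.Set.empty
  rows.foldl (fun out r =>
    let o1 : PySem.Dict String String :=
      mapping.foldl (fun o p => o.insert p.1 (csvFirstAlias (PySem.Dict.mk r) p.2)) PySem.Dict.empty
    let o2 : PySem.Dict String String :=
      r.foldl (fun o kv => if PySem.Set.contains alias_flat kv.1 then o else o.insert kv.1 kv.2) o1
    out ++ [o2.items]) []

-- ===== PORT B =====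
-- body of B's inner loop 'if cn not in cand or pos < cand[cn][0]: cand[cn] = (pos, v)'
def csvCombine (cand : PySem.Dict String (Int × String)) (v : String) (cp : String × Int) : PySem.Dict String (Int × String) :=
  match cand.get? cp.1 with
  | none => cand.insert cp.1 (cp.2, v)
  | some pv => if cp.2 < pv.1 then cand.insert cp.1 (cp.2, v) else cand

def csv_map_alt (rows : List (List (String × String))) (mapping : List (String × List String)) : List (List (String × String)) :=
  let pairs : List (String × (String × Int)) :=
    mapping.flatMap (fun p => (PySem.List.enumerate p.2).map (fun ia => (ia.2, (p.1, ia.1))))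
  let index : PySem.Dict String (List (String × Int)) :=
    pairs.foldl (fun d q => d.modify q.1 [] (· ++ [q.2])) PySem.Dict.empty
  rows.foldl (fun out r =>
    let cand : PySem.Dict String (Int × String) :=
      r.foldl (fun cand kv =>
        if kv.2 ≠ "" ∧ index.contains kv.1 then
          (index.getD kv.1 []).foldl (fun c cp => csvCombine c kv.2 cp) cand
        else cand) PySem.Dict.empty
    let o1 : PySem.Dict String String :=
      mapping.foldl (fun o p =>
        o.insert p.1 (match cand.get? p.1 with | some pv => pv.2 | none => "")) PySem.Dict.empty
    let o2 : PySem.Dict String String :=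
      r.foldl (fun o kv => if index.contains kv.1 then o else o.insert kv.1 kv.2) o1
    out ++ [o2.items]) []

-- ===== PRECONDITION & SPEC =====
-- Pre_ excludes association lists with duplicate keys: both 'rows' elements and 'mapping' encode
-- Python dicts, which cannot hold duplicate keys, so such lists represent no Python input at all.
def Pre_csv_map (rows : List (List (String × String))) (mapping : List (String × List String)) : Prop :=
  (∀ r ∈ rows, (r.map Prod.fst).Nodup) ∧ (mapping.map Prod.fst).Nodup
instance (rows : List (List (String × String))) (mapping : List (String × List String)) : Decidable (Pre_csv_map rows mapping) := by unfold Pre_csv_map; infer_instance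

def pvWitness_csv_map : (List (List (String × String))) × (List (String × List String)) :=
  ([[("a", "x"), ("extra", "y")], [("b", "z")]], [("name", ["a", "b"])])

def Spec_csv_map (rows : List (List (String × String))) (mapping : List (String × List String)) (out : List (List (String × String))) : Prop := out = csv_map_alt rows mapping
instance (rows : List (List (String × String))) (mapping : List (String × List String)) (out : List (List (String × String))) : Decidable (Spec_csv_map rows mapping out) := by unfold Spec_csv_map; infer_instance

-- ===== CLAIM (what is proved, stated in full; the proofs are below) =====
def Claim_equal_csv_map : Prop := ∀ (rows : List (List (String × String))) (mapping : List (String × List String)), Dom_csv_map rows mapping → Pre_csv_map rows mapping → Spec_csv_map rows mapping (csv_map rows mapping)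

-- ===== LEMMAS AND PROOFS =====

-- positions (from start s) at which k occurs in an alias list
def occsAux (k : String) : List String → Int → List Int
  | [], _ => []
  | a :: rest, s => if a = k then s :: occsAux k rest (s + 1) else occsAux k rest (s + 1)

-- (position, value) of the truthy hits of r along an alias list, in alias order
def hitsAux (r : PySem.Dict String String) : List String → Int → List (Int × String)
  | [], _ => []
  | a :: rest, s =>
    match r.get? a with
    | some w => if w ≠ "" then (s, w) :: hitsAux r rest (s + 1) else hitsAux r rest (s + 1)
    | none => hitsAux r rest (s + 1)

-- csvCombine projected to one key: keep the candidate with the smaller position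
def combO (acc : Option (Int × String)) (p : Int × String) : Option (Int × String) :=
  match acc with
  | none => some p
  | some pv => if p.1 < pv.1 then some p else acc

-- the index built by csv_map_alt
def csvIndex (mapping : List (String × List String)) : PySem.Dict String (List (String × Int)) :=
  (mapping.flatMap (fun p => (PySem.List.enumerate p.2).map (fun ia => (ia.2, (p.1, ia.1))))).foldl
    (fun d q => d.modify q.1 [] (· ++ [q.2])) PySem.Dict.empty

theorem le_of_mem_occsAux (k : String) (al : List String) (s i : Int) (h : i ∈ occsAux k al s) : s ≤ i := by
  revert h
  induction al generalizing s with
  | nil => intro h; simp [occsAux] at h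
  | cons a rest ih =>
    intro h
    by_cases ha : a = k
    · simp only [occsAux, if_pos ha, List.mem_cons] at h
      rcases h with h | h
      · omega
      · have := ih (s + 1) h; omega
    · simp only [occsAux, if_neg ha] at h
      have := ih (s + 1) h; omega

theorem occs_det (k k' : String) (al : List String) (s i : Int)
    (h : i ∈ occsAux k al s) (h' : i ∈ occsAux k' al s) : k = k' := by
  revert h h'
  induction al generalizing s with
  | nil => intro h; simp [occsAux] at h
  | cons a rest ih =>
    intro h h'
    by_cases ha : a = k <;> by_cases ha' : a = k'
    · exact ha ▸ ha'
    · simp only [occsAux, if_pos ha, if_neg ha', List.mem_cons] at h h'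
      have hs := le_of_mem_occsAux k' rest (s + 1) i h'
      rcases h with h | h
      · omega
      · exact ih (s + 1) h h'
    · simp only [occsAux, if_neg ha, if_pos ha', List.mem_cons] at h h'
      have hs := le_of_mem_occsAux k rest (s + 1) i h
      rcases h' with h' | h'
      · omega
      · exact ih (s + 1) h h'
    · simp only [occsAux, if_neg ha, if_neg ha'] at h h'
      exact ih (s + 1) h h'

theorem occsAux_eq_nil_of_not_mem (k : String) (al : List String) (s : Int) (h : k ∉ al) :
    occsAux k al s = [] := by
  induction al generalizing s with
  | nil => simp [occsAux]
  | cons a rest ih =>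
    have ha : a ≠ k := fun e => h (by simp [e])
    simp only [occsAux, if_neg ha]
    exact ih (s + 1) (fun hk => h (List.mem_cons_of_mem _ hk))

theorem le_of_mem_hitsAux (r : PySem.Dict String String) (al : List String) (s : Int)
    (p : Int × String) (h : p ∈ hitsAux r al s) : s ≤ p.1 := by
  revert h
  induction al generalizing s with
  | nil => intro h; simp [hitsAux] at h
  | cons a rest ih =>
    intro h
    rcases hg : r.get? a with _ | w
    · simp only [hitsAux, hg] at h; have := ih (s + 1) h; omega
    · by_cases hw : w ≠ ""
      · simp only [hitsAux, hg, if_pos hw] at h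
        rcases List.mem_cons.mp h with h | h
        · subst h; simp
        · have := ih (s + 1) h; omega
      · simp only [hitsAux, hg, if_neg hw] at h; have := ih (s + 1) h; omega

theorem pairwise_hitsAux (r : PySem.Dict String String) (al : List String) (s : Int) :
    (hitsAux r al s).Pairwise (fun p q => p.1 < q.1) := by
  induction al generalizing s with
  | nil => simp [hitsAux]
  | cons a rest ih =>
    rcases hg : r.get? a with _ | w
    · simp only [hitsAux, hg]; exact ih (s + 1)
    · by_cases hw : w ≠ ""
      · simp only [hitsAux, hg, if_pos hw]
        refine List.Pairwise.cons ?_ (ih (s + 1))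
        intro q hq
        have := le_of_mem_hitsAux r rest (s + 1) q hq
        simp; omega
      · simp only [hitsAux, hg, if_neg hw]; exact ih (s + 1)

theorem mem_hitsAux (r : PySem.Dict String String) (al : List String) (s : Int) (p : Int × String) :
    p ∈ hitsAux r al s ↔ ∃ k, r.get? k = some p.2 ∧ p.2 ≠ "" ∧ p.1 ∈ occsAux k al s := by
  induction al generalizing s with
  | nil => simp [hitsAux, occsAux]
  | cons a rest ih =>
    rcases hg : r.get? a with _ | w
    · simp only [hitsAux, hg]
      rw [ih (s + 1)]
      constructor
      · rintro ⟨k, hk, hne, hocc⟩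
        refine ⟨k, hk, hne, ?_⟩
        by_cases hak : a = k
        · simp only [occsAux, if_pos hak]; exact List.mem_cons_of_mem _ hocc
        · simp only [occsAux, if_neg hak]; exact hocc
      · rintro ⟨k, hk, hne, hocc⟩
        by_cases hak : a = k
        · rw [← hak, hg] at hk; exact absurd hk (by simp)
        · simp only [occsAux, if_neg hak] at hocc; exact ⟨k, hk, hne, hocc⟩
    · by_cases hw : w ≠ ""
      · simp only [hitsAux, hg, if_pos hw, List.mem_cons]
        rw [ih (s + 1)]
        constructor
        · rintro (hp | ⟨k, hk, hne, hocc⟩)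
          · subst hp
            exact ⟨a, hg, hw, by simp [occsAux]⟩
          · refine ⟨k, hk, hne, ?_⟩
            by_cases hak : a = k
            · simp only [occsAux, if_pos hak]; exact List.mem_cons_of_mem _ hocc
            · simp only [occsAux, if_neg hak]; exact hocc
        · rintro ⟨k, hk, hne, hocc⟩
          by_cases hak : a = k
          · simp only [occsAux, if_pos hak, List.mem_cons] at hocc
            rcases hocc with hps | hocc
            · left
              rw [← hak, hg] at hk
              injection hk with h
              exact Prod.ext hps h.symm
            · right; exact ⟨k, hk, hne, hocc⟩
          · simp only [occsAux, if_neg hak] at hocc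
            right; exact ⟨k, hk, hne, hocc⟩
      · simp only [hitsAux, hg, if_neg hw]
        rw [ih (s + 1)]
        constructor
        · rintro ⟨k, hk, hne, hocc⟩
          refine ⟨k, hk, hne, ?_⟩
          by_cases hak : a = k
          · simp only [occsAux, if_pos hak]; exact List.mem_cons_of_mem _ hocc
          · simp only [occsAux, if_neg hak]; exact hocc
        · rintro ⟨k, hk, hne, hocc⟩
          by_cases hak : a = k
          · rw [← hak, hg] at hk
            injection hk with h
            rw [← h] at hne
            simp at hw
            exact absurd hw hne
          · simp only [occsAux, if_neg hak] at hocc; exact ⟨k, hk, hne, hocc⟩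

theorem firstAlias_eq_head_hits (r : PySem.Dict String String) (al : List String) (s : Int) :
    csvFirstAlias r al = (((hitsAux r al s).head?).map (·.2)).getD "" := by
  induction al generalizing s with
  | nil => simp [csvFirstAlias, hitsAux]
  | cons a rest ih =>
    rcases hg : r.get? a with _ | w
    · simp only [csvFirstAlias, hitsAux, hg]; exact ih (s + 1)
    · by_cases hw : w ≠ ""
      · simp only [csvFirstAlias, hitsAux, hg, if_pos hw]; simp
      · simp only [csvFirstAlias, hitsAux, hg, if_neg hw]; exact ih (s + 1)

theorem get?_csvCombine (cand : PySem.Dict String (Int × String)) (v : String)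
    (cp : String × Int) (cn : String) :
    (csvCombine cand v cp).get? cn
      = if cp.1 = cn then combO (cand.get? cn) (cp.2, v) else cand.get? cn := by
  unfold csvCombine combO
  by_cases h : cp.1 = cn
  · rw [if_pos h, h]
    rcases hg : cand.get? cn with _ | pv
    · simp [PySem.Dict.get?_insert_self]
    · by_cases hlt : cp.2 < pv.1
      · simp [hlt, PySem.Dict.get?_insert_self]
      · simp [hlt, hg]
  · rw [if_neg h]
    have hne : cn ≠ cp.1 := fun e => h e.symm
    rcases hg : cand.get? cp.1 with _ | pv
    · exact PySem.Dict.get?_insert_of_ne _ _ hne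
    · by_cases hlt : cp.2 < pv.1
      · simp only [hlt, if_true]
        exact PySem.Dict.get?_insert_of_ne _ _ hne
      · simp [hlt]

theorem get?_foldl_csvCombine (es : List (String × Int)) (cand : PySem.Dict String (Int × String))
    (v : String) (cn : String) :
    ((es.foldl (fun c cp => csvCombine c v cp) cand).get? cn)
      = (es.filterMap (fun cp => if cp.1 = cn then some (cp.2, v) else none)).foldl combO (cand.get? cn) := by
  induction es generalizing cand with
  | nil => simp
  | cons cp es ih =>
    simp only [List.foldl_cons, List.filterMap_cons]
    by_cases h : cp.1 = cn
    · rw [if_pos h, List.foldl_cons, ih, get?_csvCombine, if_pos h]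
    · rw [if_neg h, ih, get?_csvCombine, if_neg h]

theorem foldl_combO_ne_none (l : List (Int × String)) (p : Int × String) :
    l.foldl combO (some p) ≠ none := by
  induction l generalizing p with
  | nil => simp
  | cons q l ih =>
    simp only [List.foldl_cons]
    by_cases hlt : q.1 < p.1
    · rw [show combO (some p) q = some q by simp [combO, hlt]]; exact ih q
    · rw [show combO (some p) q = some p by simp [combO, hlt]]; exact ih p

theorem foldl_combO_none_eq_none (l : List (Int × String)) (h : l.foldl combO none = none) :
    l = [] := by
  cases l with
  | nil => rfl
  | cons q l =>
    simp only [List.foldl_cons, combO] at h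
    exact absurd h (foldl_combO_ne_none l q)

theorem foldl_combO_min (l : List (Int × String)) (acc : Option (Int × String)) (p : Int × String)
    (h : l.foldl combO acc = some p) :
    (p ∈ l ∨ acc = some p) ∧ (∀ q ∈ l, p.1 ≤ q.1) ∧ (∀ pv, acc = some pv → p.1 ≤ pv.1) := by
  induction l generalizing acc with
  | nil =>
    simp only [List.foldl_nil] at h
    refine ⟨Or.inr h, by simp, fun pv hpv => ?_⟩
    rw [h] at hpv; injection hpv with h'; rw [h']
  | cons q l ih =>
    simp only [List.foldl_cons] at h
    obtain ⟨h1, h2, h3⟩ := ih (combO acc q) h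
    rcases hacc : acc with _ | pv
    · rw [hacc] at h3
      have hq : p.1 ≤ q.1 := h3 q (by simp [combO])
      refine ⟨?_, ?_, by simp⟩
      · rcases h1 with h1 | h1
        · exact Or.inl (List.mem_cons_of_mem _ h1)
        · rw [hacc] at h1; simp only [combO] at h1
          injection h1 with h1'; exact Or.inl (h1' ▸ List.mem_cons_self ..)
      · intro q' hq'
        rcases List.mem_cons.mp hq' with e | hmem
        · exact e ▸ hq
        · exact h2 q' hmem
    · rw [hacc] at h3 h1
      simp only [combO] at h1 h3
      by_cases hlt : q.1 < pv.1
      · rw [if_pos hlt] at h1 h3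
        have hq : p.1 ≤ q.1 := h3 q rfl
        refine ⟨?_, ?_, ?_⟩
        · rcases h1 with h1 | h1
          · exact Or.inl (List.mem_cons_of_mem _ h1)
          · injection h1 with h1'; exact Or.inl (h1' ▸ List.mem_cons_self ..)
        · intro q' hq'
          rcases List.mem_cons.mp hq' with e | hmem
          · exact e ▸ hq
          · exact h2 q' hmem
        · intro pv' hpv'; injection hpv' with e; subst e; omega
      · rw [if_neg hlt] at h1 h3
        have hp : p.1 ≤ pv.1 := h3 pv rfl
        refine ⟨?_, ?_, ?_⟩
        · rcases h1 with h1 | h1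
          · exact Or.inl (List.mem_cons_of_mem _ h1)
          · exact Or.inr h1
        · intro q' hq'
          rcases List.mem_cons.mp hq' with e | hmem
          · subst e; omega
          · exact h2 q' hmem
        · intro pv' hpv'; injection hpv' with e; subst e; omega

theorem contrib_eq (cn v k c : String) (al : List String) (s : Int) :
    ((((PySem.List.enumerate al s).map (fun ia => (ia.2, (c, ia.1)))).filter
        (fun q => q.1 == k)).map (fun q => q.2)).filterMap
      (fun cp => if cp.1 = cn then some (cp.2, v) else none)
      = if c = cn then (occsAux k al s).map (fun i => (i, v)) else [] := by
  induction al generalizing s with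
  | nil =>
    simp only [PySem.List.enumerate_nil, List.map_nil, List.filter_nil, List.filterMap_nil, occsAux]
    split <;> rfl
  | cons a rest ih =>
    rw [PySem.List.enumerate_cons]
    simp only [List.map_cons, List.filter_cons]
    by_cases hak : a = k
    · subst hak
      simp only [beq_self_eq_true, if_true, List.map_cons]
      rw [show occsAux a (a :: rest) s = s :: occsAux a rest (s + 1) from by simp [occsAux]]
      by_cases hc : c = cn
      · have hf : (fun (cp : String × Int) => if cp.1 = cn then some (cp.2, v) else none) (c, s)
            = some (s, v) := by simp [hc]
        simp only [List.filterMap_cons, hf]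
        rw [ih (s + 1), if_pos hc, if_pos hc, List.map_cons]
      · have hf : (fun (cp : String × Int) => if cp.1 = cn then some (cp.2, v) else none) (c, s)
            = none := by simp [hc]
        simp only [List.filterMap_cons, hf]
        rw [ih (s + 1), if_neg hc, if_neg hc]
    · have : ((a, (c, s)).1 == k) = false := by simp [hak]
      rw [this]
      simp only [occsAux, if_neg hak]
      exact ih (s + 1)

theorem pairs_filter_nil (mapping : List (String × List String)) (cn v k : String)
    (h : cn ∉ mapping.map Prod.fst) :
    ((((mapping.flatMap (fun p => (PySem.List.enumerate p.2).map (fun ia => (ia.2, (p.1, ia.1)))))).filter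
        (fun q => q.1 == k)).map (fun q => q.2)).filterMap
      (fun cp => if cp.1 = cn then some (cp.2, v) else none) = [] := by
  induction mapping with
  | nil => rfl
  | cons p m ih =>
    simp only [List.flatMap_cons, List.filter_append, List.map_append, List.filterMap_append]
    have hc : p.1 ≠ cn := fun e => h (List.mem_map.mpr ⟨p, List.mem_cons_self .., e⟩)
    rw [contrib_eq cn v k p.1 p.2 0, if_neg hc, List.nil_append]
    exact ih (fun hm => h (by rw [List.map_cons]; exact List.mem_cons_of_mem _ hm))

-- index.getD k [], restricted to canonical cn and tagged with value v, is occsAux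
theorem index_filter_cn (mapping : List (String × List String)) (cn : String) (al : List String)
    (hnd : (mapping.map Prod.fst).Nodup) (hmem : (cn, al) ∈ mapping) (k : String) (v : String) :
    ((csvIndex mapping).getD k []).filterMap (fun cp => if cp.1 = cn then some (cp.2, v) else none)
      = (occsAux k al 0).map (fun i => (i, v)) := by
  unfold csvIndex
  rw [PySem.Dict.getD_foldl_modify_append]
  simp only [PySem.Dict.getD_empty, List.nil_append]
  induction mapping with
  | nil => simp at hmem
  | cons p m ih =>
    simp only [List.flatMap_cons, List.filter_append, List.map_append, List.filterMap_append]
    rw [List.map_cons] at hnd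
    obtain ⟨hh, ht⟩ := List.nodup_cons.mp hnd
    by_cases hc : p.1 = cn
    · rcases List.mem_cons.mp hmem with he | hm
      · have hal : p.2 = al := by rw [← he]
        have htl : cn ∉ m.map Prod.fst := hc ▸ hh
        rw [contrib_eq cn v k p.1 p.2 0, if_pos hc, hal,
            pairs_filter_nil m cn v k htl, List.append_nil]
      · exact absurd (List.mem_map.mpr ⟨(cn, al), hm, hc ▸ rfl⟩) (hc ▸ hh)
    · have hm : (cn, al) ∈ m := by
        rcases List.mem_cons.mp hmem with he | hm
        · exact absurd (by rw [← he]) hc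
        · exact hm
      rw [contrib_eq cn v k p.1 p.2 0, if_neg hc, List.nil_append]
      exact ih ht hm

theorem contains_csvIndex (mapping : List (String × List String)) (k : String) :
    (csvIndex mapping).contains k = true ↔ ∃ p ∈ mapping, k ∈ p.2 := by
  unfold csvIndex
  rw [PySem.Dict.contains_iff_mem_keys, PySem.Dict.keys_foldl_modify_key]
  rw [PySem.Set.mem_update]
  simp only [PySem.Dict.keys_empty]
  constructor
  · intro h
    rcases h with h | h
    · exact absurd h (by simp)
    · rcases List.mem_map.mp h with ⟨q, hq, hk⟩
      rcases List.mem_flatMap.mp hq with ⟨p, hp, hqp⟩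
      rcases List.mem_map.mp hqp with ⟨ia, hia, he⟩
      refine ⟨p, hp, ?_⟩
      rw [← hk, ← he]
      rcases (PySem.List.mem_enumerate_iff _ _ _).mp hia with ⟨n, hn, rfl⟩
      exact List.getElem_mem hn
  · rintro ⟨p, hp, hk⟩
    right
    rcases List.mem_iff_getElem.mp hk with ⟨n, hn, he⟩
    refine List.mem_map.mpr ⟨(k, (p.1, ((n : Int)))), List.mem_flatMap.mpr ⟨p, hp, ?_⟩, rfl⟩
    refine List.mem_map.mpr ⟨(((n : Int)), k), ?_, rfl⟩
    exact (PySem.List.mem_enumerate_iff _ _ _).mpr ⟨n, hn, by simp [he]⟩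

theorem mem_foldl_update (l : List (String × List String)) (s : PySem.Set String) (k : String) :
    k ∈ l.foldl (fun s p => PySem.Set.update s p.2) s ↔ k ∈ s ∨ ∃ p ∈ l, k ∈ p.2 := by
  induction l generalizing s with
  | nil => simp
  | cons p m ih =>
    simp only [List.foldl_cons]
    rw [ih]
    simp only [PySem.Set.mem_update, List.mem_cons]
    constructor
    · rintro ((h | h) | ⟨q, hq, hk⟩)
      · exact Or.inl h
      · exact Or.inr ⟨p, Or.inl rfl, h⟩
      · exact Or.inr ⟨q, Or.inr hq, hk⟩
    · rintro (h | ⟨q, (he | hq), hk⟩)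
      · exact Or.inl (Or.inl h)
      · exact Or.inl (Or.inr (he ▸ hk))
      · exact Or.inr ⟨q, hq, hk⟩

theorem contains_alias_flat_eq (mapping : List (String × List String)) (k : String) :
    PySem.Set.contains (mapping.foldl (fun s p => PySem.Set.update s p.2) PySem.Set.empty) k
      = (csvIndex mapping).contains k := by
  have h1 : PySem.Set.contains (mapping.foldl (fun s p => PySem.Set.update s p.2) PySem.Set.empty) k = true ↔ ∃ p ∈ mapping, k ∈ p.2 := by
    rw [PySem.Set.contains_iff, mem_foldl_update]
    simp [PySem.Set.empty]
  exact Bool.eq_iff_iff.mpr (h1.trans (contains_csvIndex mapping k).symm)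

theorem get?_candFold (index : PySem.Dict String (List (String × Int))) (r : List (String × String))
    (cn : String) (cand : PySem.Dict String (Int × String)) :
    (r.foldl (fun cand kv =>
        if kv.2 ≠ "" ∧ index.contains kv.1 then
          (index.getD kv.1 []).foldl (fun c cp => csvCombine c kv.2 cp) cand
        else cand) cand).get? cn
      = r.foldl (fun acc kv =>
        if kv.2 ≠ "" ∧ index.contains kv.1 then
          ((index.getD kv.1 []).filterMap (fun cp => if cp.1 = cn then some (cp.2, kv.2) else none)).foldl combO acc
        else acc) (cand.get? cn) := by
  induction r generalizing cand with
  | nil => rfl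
  | cons kv rest ih =>
    simp only [List.foldl_cons]
    by_cases h : kv.2 ≠ "" ∧ index.contains kv.1
    · rw [if_pos h, if_pos h, ih, get?_foldl_csvCombine]
    · rw [if_neg h, if_neg h, ih]

-- all hits of a row against one alias list, in row order
def rowHits (al : List String) (r : List (String × String)) : List (Int × String) :=
  r.flatMap (fun kv => if kv.2 ≠ "" then (occsAux kv.1 al 0).map (fun i => (i, kv.2)) else [])

theorem mem_rowHits_iff (al : List String) (r : List (String × String))
    (hr : (r.map Prod.fst).Nodup) (q : Int × String) :
    q ∈ rowHits al r ↔ q ∈ hitsAux (PySem.Dict.mk r) al 0 := by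
  rw [mem_hitsAux]
  simp only [rowHits, List.mem_flatMap]
  constructor
  · rintro ⟨kv, hkv, hq⟩
    by_cases hne : kv.2 ≠ ""
    · rw [if_pos hne] at hq
      rcases List.mem_map.mp hq with ⟨i, hi, he⟩
      have hget : (PySem.Dict.mk r).get? kv.1 = some kv.2 :=
        PySem.Dict.get?_of_mem_items _ (by exact hkv) (by exact hr)
      rw [← he]
      exact ⟨kv.1, hget, hne, hi⟩
    · rw [if_neg hne] at hq
      exact absurd hq (by simp)
  · rintro ⟨k, hget, hne, hocc⟩
    have hmem : (k, q.2) ∈ r := PySem.Dict.mem_items_of_get?_eq_some _ hget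
    refine ⟨(k, q.2), hmem, ?_⟩
    rw [if_pos hne]
    exact List.mem_map.mpr ⟨q.1, hocc, by simp⟩

-- the candidate dict of csv_map_alt, looked up at a canonical name, is the first (least-position) hit
theorem cand_eq_head_hits (mapping : List (String × List String)) (r : List (String × String))
    (cn : String) (al : List String)
    (hr : (r.map Prod.fst).Nodup) (hnd : (mapping.map Prod.fst).Nodup) (hmem : (cn, al) ∈ mapping) :
    ((r.foldl (fun cand kv =>
        if kv.2 ≠ "" ∧ (csvIndex mapping).contains kv.1 then
          ((csvIndex mapping).getD kv.1 []).foldl (fun c cp => csvCombine c kv.2 cp) cand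
        else cand) (PySem.Dict.empty : PySem.Dict String (Int × String))).get? cn)
      = (hitsAux (PySem.Dict.mk r) al 0).head? := by
  rw [get?_candFold, PySem.Dict.get?_empty]
  have hstep : ∀ kv ∈ r, ∀ (acc : Option (Int × String)),
      (if kv.2 ≠ "" ∧ (csvIndex mapping).contains kv.1 then
        (((csvIndex mapping).getD kv.1 []).filterMap (fun cp => if cp.1 = cn then some (cp.2, kv.2) else none)).foldl combO acc
      else acc)
      = (if kv.2 ≠ "" then (occsAux kv.1 al 0).map (fun i => (i, kv.2)) else []).foldl combO acc := by
    intro kv hkv acc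
    by_cases hne : kv.2 ≠ ""
    · by_cases hct : (csvIndex mapping).contains kv.1 = true
      · rw [if_pos ⟨hne, hct⟩, if_pos hne, index_filter_cn mapping cn al hnd hmem kv.1 kv.2]
      · have hnal : kv.1 ∉ al := fun hin => hct ((contains_csvIndex mapping kv.1).mpr ⟨(cn, al), hmem, hin⟩)
        rw [if_neg (fun hh => hct hh.2), if_pos hne, occsAux_eq_nil_of_not_mem kv.1 al 0 hnal]
        rfl
    · rw [if_neg (fun hh => hne hh.1), if_neg hne]
      rfl
  rw [PySem.List.foldl_congr_mem' _ _ _ _ hstep, ← List.foldl_flatMap]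
  rcases hres : (r.flatMap (fun kv => if kv.2 ≠ "" then (occsAux kv.1 al 0).map (fun i => (i, kv.2)) else [])).foldl combO none with _ | p
  · have hnil := foldl_combO_none_eq_none _ hres
    cases hl : hitsAux (PySem.Dict.mk r) al 0 with
    | nil => rw [hres]; rfl
    | cons q tl =>
      exfalso
      have hq : q ∈ rowHits al r := (mem_rowHits_iff al r hr q).mpr (by rw [hl]; exact List.mem_cons_self ..)
      unfold rowHits at hq
      rw [hnil] at hq
      exact absurd hq (by simp)
  · obtain ⟨hmemL, hminL, -⟩ := foldl_combO_min _ _ _ hres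
    have hpL : p ∈ rowHits al r := by
      rcases hmemL with h | h
      · exact h
      · exact absurd h (by simp)
    have hpH := (mem_rowHits_iff al r hr p).mp hpL
    cases hl : hitsAux (PySem.Dict.mk r) al 0 with
    | nil => rw [hl] at hpH; exact absurd hpH (by simp)
    | cons q tl =>
      have hqH : q ∈ hitsAux (PySem.Dict.mk r) al 0 := by rw [hl]; exact List.mem_cons_self ..
      have hqL := (mem_rowHits_iff al r hr q).mpr hqH
      have h1 : p.1 ≤ q.1 := hminL q hqL
      have h2 : q.1 ≤ p.1 := by
        have hpw := pairwise_hitsAux (PySem.Dict.mk r) al 0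
        rw [hl] at hpw
        have hpH' := hpH
        rw [hl] at hpH'
        rcases List.mem_cons.mp hpH' with e | hmemtl
        · exact le_of_eq (by rw [e])
        · exact le_of_lt ((List.pairwise_cons.mp hpw).1 p hmemtl)
      have h12 : p.1 = q.1 := le_antisymm h1 h2
      rcases (mem_hitsAux _ _ _ p).mp hpH with ⟨k1, hk1, _, ho1⟩
      rcases (mem_hitsAux _ _ _ q).mp hqH with ⟨k2, hk2, _, ho2⟩
      have hkk : k1 = k2 := occs_det k1 k2 al 0 p.1 ho1 (h12 ▸ ho2)
      rw [hkk] at hk1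
      rw [hk1] at hk2
      injection hk2 with hv
      rw [hres]
      exact congrArg some (Prod.ext h12 hv)


-- proof-side names for the two ports' row computations
def aliasFlat (mapping : List (String × List String)) : PySem.Set String :=
  mapping.foldl (fun s p => PySem.Set.update s p.2) PySem.Set.empty

def candOf (mapping : List (String × List String)) (r : List (String × String)) :
    PySem.Dict String (Int × String) :=
  r.foldl (fun cand kv =>
    if kv.2 ≠ "" ∧ (csvIndex mapping).contains kv.1 then
      ((csvIndex mapping).getD kv.1 []).foldl (fun c cp => csvCombine c kv.2 cp) cand
    else cand) PySem.Dict.empty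

def rowA (mapping : List (String × List String)) (r : List (String × String)) : List (String × String) :=
  (r.foldl (fun o kv => if PySem.Set.contains (aliasFlat mapping) kv.1 then o else o.insert kv.1 kv.2)
    (mapping.foldl (fun o p => o.insert p.1 (csvFirstAlias (PySem.Dict.mk r) p.2)) PySem.Dict.empty)).items

def rowB (mapping : List (String × List String)) (r : List (String × String)) : List (String × String) :=
  (r.foldl (fun o kv => if (csvIndex mapping).contains kv.1 then o else o.insert kv.1 kv.2)
    (mapping.foldl (fun o p =>
      o.insert p.1 (match (candOf mapping r).get? p.1 with | some pv => pv.2 | none => "")) PySem.Dict.empty)).items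

theorem csv_map_eq_map (rows : List (List (String × String))) (mapping : List (String × List String)) :
    csv_map rows mapping = rows.map (rowA mapping) := by
  simp only [csv_map]
  rw [PySem.List.foldl_append_singleton_eq_map, List.nil_append]
  rfl

theorem csv_map_alt_eq_map (rows : List (List (String × String))) (mapping : List (String × List String)) :
    csv_map_alt rows mapping = rows.map (rowB mapping) := by
  simp only [csv_map_alt]
  rw [PySem.List.foldl_append_singleton_eq_map, List.nil_append]
  rfl

theorem row_eq (mapping : List (String × List String)) (r : List (String × String))
    (hr : (r.map Prod.fst).Nodup) (hnd : (mapping.map Prod.fst).Nodup) :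
    rowA mapping r = rowB mapping r := by
  unfold rowA rowB aliasFlat
  have ho1 : (mapping.foldl (fun o p => o.insert p.1 (csvFirstAlias (PySem.Dict.mk r) p.2)) PySem.Dict.empty)
      = (mapping.foldl (fun o p =>
          o.insert p.1 (match (candOf mapping r).get? p.1 with | some pv => pv.2 | none => "")) PySem.Dict.empty) := by
    refine PySem.List.foldl_congr_mem' _ _ _ _ ?_
    intro p hp o
    obtain ⟨cn, al⟩ := p
    have hc : (candOf mapping r).get? cn = (hitsAux (PySem.Dict.mk r) al 0).head? :=
      cand_eq_head_hits mapping r cn al hr hnd hp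
    rw [firstAlias_eq_head_hits (PySem.Dict.mk r) al 0, hc]
    cases (hitsAux (PySem.Dict.mk r) al 0).head? <;> rfl
  rw [ho1]
  refine congrArg PySem.Dict.items ?_
  refine PySem.List.foldl_congr_mem' _ _ _ _ ?_
  intro kv _ o
  rw [contains_alias_flat_eq]

-- ===== VERDICT (by name: the statement is the Claim_ definition above) =====
theorem csv_map_spec : Claim_equal_csv_map := by
  intro rows mapping _ hpre
  unfold Spec_csv_map
  rw [csv_map_eq_map, csv_map_alt_eq_map]
  exact List.map_congr_left (fun r hr => row_eq mapping r (hpre.1 r hr) hpre.2)
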